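-- pv_equiv track=rewrite | github.com/Cld338/Problem-Solving | 백준/Gold/10096. 세 친구/세 친구.py | solve
-- ===== SOURCE A (Python) =====
-- def solve(U):
--     N = len(U)
--     if N % 2 == 0:
--         return "NOT POSSIBLE"
--
--     mid = N // 2
--     answers = set()
--     left, right = U[:mid+1], U[mid+1:]
--     idx_l, idx_r, mismatch = 0, 0, 0
--     S1 = []
--     while idx_r < len(right) and idx_l < len(left):
--         if left[idx_l] == right[idx_r]:
--             S1.append(left[idx_l])
--             idx_l += 1
--             idx_r += 1
--         else:
--             if mismatch == 0:
--                 mismatch += 1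
--                 idx_l += 1
--             else:
--                 S1 = None
--                 break
--     if mismatch == 0:
--         S1 = left[:-1]
--     if S1 and len(S1) == mid:
--         answers.add(''.join(S1))
--
--     left, right = U[:mid], U[mid:]
--     idx_l, idx_r, mismatch = 0, 0, 0
--     S2 = []
--     while idx_l < len(left) and idx_r < len(right):
--         if left[idx_l] == right[idx_r]:
--             S2.append(left[idx_l])
--             idx_l += 1
--             idx_r += 1
--         else:
--             if mismatch == 0:
--                 mismatch += 1
--                 idx_r += 1
--             else:
--                 S2 = None
--                 break
--     if mismatch == 0:
--         S2 = right[:-1]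
--     if S2 and len(S2) == mid:
--         answers.add(''.join(S2))
--
--     if len(answers) == 0:
--         return "NOT POSSIBLE"
--     elif len(answers) > 1:
--         return "NOT UNIQUE"
--     else:
--         return answers.pop()
-- ===== SOURCE B (Python) =====
-- def _lcp(x, y):
--     p = 0
--     while p < len(x) and p < len(y) and x[p] == y[p]:
--         p += 1
--     return p
--
--
-- def _ok(long, short):
--     # deleting one char from `long` can yield `short` iff
--     # common prefix + common suffix cover all of `short`
--     p = _lcp(long, short)
--     s = _lcp(long[::-1], short[::-1])
--     return p + s >= len(short)
--
--
-- def solve(U):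
--     N = len(U)
--     if N % 2 == 0:
--         return "NOT POSSIBLE"
--     mid = N // 2
--     answers = set()
--     if mid:
--         if _ok(U[:mid + 1], U[mid + 1:]):
--             answers.add(U[mid + 1:])
--         if _ok(U[mid:], U[:mid]):
--             answers.add(U[:mid])
--     if not answers:
--         return "NOT POSSIBLE"
--     if len(answers) > 1:
--         return "NOT UNIQUE"
--     return answers.pop()
-- ===== Notes on version B (the rewrite author's own statement) =====
-- stated objective: alternative
-- what changed: Replaces A's two-pointer scans that allow one skipped character (with mismatch flag, incremental candidate list and post-loop patching) by a direct longest-common-prefix + longest-common-suffix coverage test per half, adding the shorter half itself as the candidate.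
import Mathlib
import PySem

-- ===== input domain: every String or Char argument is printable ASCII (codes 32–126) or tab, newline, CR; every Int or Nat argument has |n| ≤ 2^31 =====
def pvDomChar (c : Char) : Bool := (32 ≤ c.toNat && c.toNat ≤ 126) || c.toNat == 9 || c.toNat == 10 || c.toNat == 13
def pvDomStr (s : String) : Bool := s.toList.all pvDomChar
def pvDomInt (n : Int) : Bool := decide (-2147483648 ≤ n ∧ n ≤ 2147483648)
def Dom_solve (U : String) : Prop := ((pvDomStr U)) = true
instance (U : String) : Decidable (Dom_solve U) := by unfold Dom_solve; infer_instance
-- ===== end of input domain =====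

-- B replaces A's two-pointer one-mismatch scans by a longest-common-prefix + longest-common-suffix
-- test per half (objective: alternative decomposition, same linear cost).

-- ===== PORT A =====
-- the first while-loop of A: two pointers over (left, right), one allowed skip in `left`;
-- returns (S1 as Option — none when the loop broke with S1 = None — and the final mismatch flag)
def scanA : List Char → List Char → Nat → List Char → Option (List Char) × Nat
  | a :: ls, b :: rs, m, acc =>
    if a = b then scanA ls rs m (acc ++ [a])
    else if m = 0 then scanA ls (b :: rs) 1 acc
    else (none, m)
  | _, _, m, acc => (some acc, m)
  termination_by l _ _ _ => l.length

-- the second while-loop of A: same scan, but the skip is in `right`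
def scanA2 : List Char → List Char → Nat → List Char → Option (List Char) × Nat
  | a :: ls, b :: rs, m, acc =>
    if a = b then scanA2 ls rs m (acc ++ [a])
    else if m = 0 then scanA2 (a :: ls) rs 1 acc
    else (none, m)
  | _, _, m, acc => (some acc, m)
  termination_by _ r _ _ => r.length

-- block 1 of A's body: the loop, `if mismatch == 0: S1 = left[:-1]`, `if S1 and len(S1) == mid`
-- (here mid = len(right) = short.length)
def blockA (long short : List Char) : Option (List Char) :=
  let r := scanA long short 0 []
  let S : Option (List Char) := if r.2 = 0 then some long.dropLast else r.1
  match S with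
  | some cs => if cs ≠ [] ∧ cs.length = short.length then some cs else none
  | none => none

-- block 2 of A's body, verbatim (here mid = len(left) = left.length)
def blockA2 (left right : List Char) : Option (List Char) :=
  let r := scanA2 left right 0 []
  let S : Option (List Char) := if r.2 = 0 then some right.dropLast else r.1
  match S with
  | some cs => if cs ≠ [] ∧ cs.length = left.length then some cs else none
  | none => none

-- slices U[:k] / U[k:] with 0 ≤ k are exactly take/drop; the final set.pop() is taken from a
-- one-element set, so it does not depend on Python's set iteration order
def solve (U : String) : String :=
  let cs := U.toList
  let N := cs.length
  if N % 2 = 0 then "NOT POSSIBLE"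
  else
    let mid := N / 2
    let c1 := blockA (cs.take (mid + 1)) (cs.drop (mid + 1))
    let c2 := blockA2 (cs.take mid) (cs.drop mid)
    let a1 : PySem.Set (List Char) :=
      match c1 with
      | some s1 => PySem.Set.add PySem.Set.empty s1
      | none => PySem.Set.empty
    let answers : PySem.Set (List Char) :=
      match c2 with
      | some s2 => PySem.Set.add a1 s2
      | none => a1
    if answers = [] then "NOT POSSIBLE"
    else if 1 < answers.length then "NOT UNIQUE"
    else String.ofList (answers.headD [])

-- ===== PORT B =====
-- Source B's _lcp loop (longest common prefix length)
def lcpB : List Char → List Char → Nat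
  | a :: xs, b :: ys => if a = b then lcpB xs ys + 1 else 0
  | _, _ => 0

-- Source B's _ok: prefix + suffix (lcp of the reversals) must cover the shorter half
def okB (long short : List Char) : Bool :=
  decide (short.length ≤ lcpB long short + lcpB long.reverse short.reverse)

def solve_alt (U : String) : String :=
  let cs := U.toList
  let N := cs.length
  if N % 2 = 0 then "NOT POSSIBLE"
  else
    let mid := N / 2
    let answers : PySem.Set (List Char) :=
      if mid ≠ 0 then
        let a1 : PySem.Set (List Char) :=
          if okB (cs.take (mid + 1)) (cs.drop (mid + 1)) then
            PySem.Set.add PySem.Set.empty (cs.drop (mid + 1))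
          else PySem.Set.empty
        if okB (cs.drop mid) (cs.take mid) then PySem.Set.add a1 (cs.take mid) else a1
      else PySem.Set.empty
    if answers = [] then "NOT POSSIBLE"
    else if 1 < answers.length then "NOT UNIQUE"
    else String.ofList (answers.headD [])

-- ===== PRECONDITION & SPEC =====
def Spec_solve (U : String) (out : String) : Prop := out = solve_alt U
instance (U : String) (out : String) : Decidable (Spec_solve U out) := by unfold Spec_solve; infer_instance

-- ===== CLAIM (what is proved, stated in full; the proofs are below) =====
def Claim_equal_solve : Prop := ∀ (U : String), Dom_solve U → Spec_solve U (solve U)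

-- ===== LEMMAS AND PROOFS =====

theorem scanA2_eq_scanA (l r : List Char) (m : Nat) (acc : List Char) :
    scanA2 l r m acc = scanA r l m acc := by
  match l, r with
  | a :: ls, b :: rs =>
    unfold scanA2 scanA
    by_cases hab : a = b
    · subst hab; simp only []
      exact scanA2_eq_scanA ls rs m (acc ++ [a])
    · have hba : ¬ b = a := fun h => hab h.symm
      simp only [if_neg hab, if_neg hba]
      by_cases hm : m = 0
      · simp only [if_pos hm]
        exact scanA2_eq_scanA (a :: ls) rs 1 acc
      · simp only [if_neg hm]
  | [], b :: rs => unfold scanA2 scanA; rfl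
  | a :: ls, [] => unfold scanA2 scanA; rfl
  | [], [] => unfold scanA2 scanA; rfl
termination_by r.length

theorem scan_phase1 (x y acc : List Char) (h : x.length = y.length) :
    scanA x y 1 acc = if x = y then (some (acc ++ y), 1) else (none, 1) := by
  match x, y with
  | [], [] => simp [scanA]
  | a :: xs, b :: ys =>
    unfold scanA
    by_cases hab : a = b
    · subst hab
      simp only [if_pos rfl]
      rw [scan_phase1 xs ys (acc ++ [a]) (by simpa using h)]
      by_cases hxy : xs = ys
      · simp [hxy]
      · simp [hxy]
    · simp [hab]
  | [], b :: ys => simp at h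
  | a :: xs, [] => simp at h

theorem lcp_le_left (x y : List Char) : lcpB x y ≤ x.length := by
  match x, y with
  | a :: xs, b :: ys =>
    unfold lcpB
    by_cases hab : a = b
    · simpa [hab] using lcp_le_left xs ys
    · simp [hab]
  | [], _ => simp [lcpB]
  | a :: xs, [] => simp [lcpB]

theorem lcp_le_right (x y : List Char) : lcpB x y ≤ y.length := by
  match x, y with
  | a :: xs, b :: ys =>
    unfold lcpB
    by_cases hab : a = b
    · simpa [hab] using lcp_le_right xs ys
    · simp [hab]
  | [], _ => simp [lcpB]
  | a :: xs, [] => simp [lcpB]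

theorem lcp_take (x y : List Char) : x.take (lcpB x y) = y.take (lcpB x y) := by
  match x, y with
  | a :: xs, b :: ys =>
    unfold lcpB
    by_cases hab : a = b
    · subst hab
      simp only [if_pos trivial, List.take_succ_cons, List.cons.injEq, true_and]
      exact lcp_take xs ys
    · simp [hab]
  | [], _ => simp [lcpB]
  | a :: xs, [] => simp [lcpB]

theorem take_eq_of_le_lcp (x y : List Char) (k : Nat) (h : k ≤ lcpB x y) :
    x.take k = y.take k := by
  have h1 := lcp_take x y
  have h2 : x.take k = (x.take (lcpB x y)).take k := by
    rw [List.take_take, Nat.min_eq_left h]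
  have h3 : y.take k = (y.take (lcpB x y)).take k := by
    rw [List.take_take, Nat.min_eq_left h]
  rw [h2, h3, h1]

theorem le_lcp_of_take_eq (x y : List Char) (k : Nat) (hx : k ≤ x.length) (hy : k ≤ y.length)
    (h : x.take k = y.take k) : k ≤ lcpB x y := by
  match x, y, k with
  | _, _, 0 => exact Nat.zero_le _
  | a :: xs, b :: ys, k + 1 =>
    simp only [List.take_succ_cons, List.cons.injEq] at h
    unfold lcpB
    rw [if_pos h.1]
    have := le_lcp_of_take_eq xs ys k (by simpa using hx) (by simpa using hy) h.2
    omega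
  | [], _, k + 1 => simp at hx
  | a :: xs, [], k + 1 => simp at hy

theorem scan_phase0 (long short acc : List Char) (h : long.length = short.length + 1) :
    scanA long short 0 acc =
      if lcpB long short = short.length then (some (acc ++ short), 0)
      else if long.drop (lcpB long short + 1) = short.drop (lcpB long short) then
        (some (acc ++ short), 1)
      else (none, 1) := by
  match long, short with
  | a :: ls, b :: rs =>
    unfold scanA
    by_cases hab : a = b
    · subst hab
      rw [if_pos rfl, scan_phase0 ls rs (acc ++ [a]) (by simpa using h)]
      have hl : lcpB (a :: ls) (a :: rs) = lcpB ls rs + 1 := by simp [lcpB]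
      rw [hl]
      have e1 : (lcpB ls rs + 1 = (a :: rs).length) ↔ (lcpB ls rs = rs.length) := by simp
      have e2 : (a :: ls).drop (lcpB ls rs + 1 + 1) = ls.drop (lcpB ls rs + 1) := rfl
      have e3 : (a :: rs).drop (lcpB ls rs + 1) = rs.drop (lcpB ls rs) := rfl
      rw [e2, e3]
      by_cases h1 : lcpB ls rs = rs.length
      · rw [if_pos h1, if_pos (e1.mpr h1)]
        simp
      · rw [if_neg h1, if_neg (fun hc => h1 (e1.mp hc))]
        by_cases h2 : ls.drop (lcpB ls rs + 1) = rs.drop (lcpB ls rs)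
        · rw [if_pos h2, if_pos h2]
          simp
        · rw [if_neg h2, if_neg h2]
    · rw [if_neg hab, if_pos rfl, scan_phase1 ls (b :: rs) acc (by simpa using h)]
      have hl : lcpB (a :: ls) (b :: rs) = 0 := by simp [lcpB, hab]
      rw [hl]
      have hne : ¬ ((0 : Nat) = (b :: rs).length) := by simp
      rw [if_neg hne]
      have e2 : (a :: ls).drop (0 + 1) = ls := rfl
      have e3 : (b :: rs).drop 0 = b :: rs := rfl
      rw [e2, e3]
  | a :: ls, [] => simp [scanA, lcpB]
  | [], short => simp at h

theorem cond_iff (long short : List Char) (h : long.length = short.length + 1) :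
    (lcpB long short = short.length ∨
      long.drop (lcpB long short + 1) = short.drop (lcpB long short))
    ↔ short.length ≤ lcpB long short + lcpB long.reverse short.reverse := by
  have hp := lcp_le_right long short
  constructor
  · rintro (h1 | h2)
    · omega
    · have hk : short.length - lcpB long short ≤ lcpB long.reverse short.reverse := by
        apply le_lcp_of_take_eq
        · simp only [List.length_reverse]; omega
        · simp only [List.length_reverse]; omega
        · rw [List.take_reverse, List.take_reverse]
          have e1 : long.length - (short.length - lcpB long short) = lcpB long short + 1 := by
            omega
          have e2 : short.length - (short.length - lcpB long short) = lcpB long short := by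
            omega
          rw [e1, e2, h2]
      omega
  · intro hs
    by_cases h1 : lcpB long short = short.length
    · exact Or.inl h1
    · right
      have hplt : lcpB long short < short.length := lt_of_le_of_ne hp h1
      have hk : short.length - lcpB long short ≤ lcpB long.reverse short.reverse := by omega
      have ht := take_eq_of_le_lcp long.reverse short.reverse (short.length - lcpB long short) hk
      rw [List.take_reverse, List.take_reverse] at ht
      have e1 : long.length - (short.length - lcpB long short) = lcpB long short + 1 := by omega
      have e2 : short.length - (short.length - lcpB long short) = lcpB long short := by omega
      rw [e1, e2] at ht
      exact List.reverse_injective ht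

theorem blockA_eq (long short : List Char) (h : long.length = short.length + 1) :
    blockA long short = if okB long short ∧ short ≠ [] then some short else none := by
  simp only [blockA]
  rw [scan_phase0 long short [] h]
  by_cases h1 : lcpB long short = short.length
  · rw [if_pos h1]
    have hok : okB long short = true := by
      unfold okB; simp only [decide_eq_true_eq]; omega
    have hdl : long.dropLast = short := by
      have e : long.dropLast = long.take short.length := by
        rw [List.dropLast_eq_take]
        congr 1
        omega
      rw [e, take_eq_of_le_lcp long short short.length (by omega)]
      exact List.take_of_length_le (le_refl _)
    simp [hdl, hok]
  · rw [if_neg h1]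
    by_cases h2 : long.drop (lcpB long short + 1) = short.drop (lcpB long short)
    · rw [if_pos h2]
      have hok : okB long short = true := by
        unfold okB
        simp only [decide_eq_true_eq]
        exact (cond_iff long short h).mp (Or.inr h2)
      simp [hok]
    · rw [if_neg h2]
      have hok : okB long short = false := by
        unfold okB
        simp only [decide_eq_false_iff_not]
        intro hc
        rcases (cond_iff long short h).mpr hc with h' | h'
        · exact h1 h'
        · exact h2 h'
      simp [hok]

theorem blockA2_eq (left right : List Char) (h : right.length = left.length + 1) :
    blockA2 left right = if okB right left ∧ left ≠ [] then some left else none := by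
  have e : blockA2 left right = blockA right left := by
    simp only [blockA2, blockA, scanA2_eq_scanA]
  rw [e, blockA_eq right left h]

theorem solve_eq_alt (U : String) : solve U = solve_alt U := by
  simp only [solve, solve_alt]
  generalize U.toList = cs
  by_cases h2 : cs.length % 2 = 0
  · rw [if_pos h2, if_pos h2]
  · rw [if_neg h2, if_neg h2]
    have hlen1 : (cs.take (cs.length / 2 + 1)).length
        = (cs.drop (cs.length / 2 + 1)).length + 1 := by
      simp only [List.length_take, List.length_drop]; omega
    have hlen2 : (cs.drop (cs.length / 2)).length
        = (cs.take (cs.length / 2)).length + 1 := by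
      simp only [List.length_take, List.length_drop]; omega
    rw [blockA_eq _ _ hlen1, blockA2_eq _ _ hlen2]
    by_cases hm : cs.length / 2 = 0
    · have hr1 : cs.drop (cs.length / 2 + 1) = [] := by
        have hz : (cs.drop (cs.length / 2 + 1)).length = 0 := by
          simp only [List.length_drop]; omega
        exact List.eq_nil_of_length_eq_zero hz
      have ht1 : cs.take (cs.length / 2) = [] := by
        have hz : (cs.take (cs.length / 2)).length = 0 := by
          simp only [List.length_take]; omega
        exact List.eq_nil_of_length_eq_zero hz
      have htail : cs.tail = [] := by
        have hz : cs.tail.length = 0 := by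
          simp only [List.length_tail]; omega
        exact List.eq_nil_of_length_eq_zero hz
      simp [hr1, ht1, hm, htail, PySem.Set.empty]
    · have hr1 : cs.drop (cs.length / 2 + 1) ≠ [] := by
        intro hnil
        have hz := congrArg List.length hnil
        simp only [List.length_drop, List.length_nil] at hz
        omega
      have ht1 : cs.take (cs.length / 2) ≠ [] := by
        intro hnil
        have hz := congrArg List.length hnil
        simp only [List.length_take, List.length_nil] at hz
        omega
      by_cases hb1 : okB (cs.take (cs.length / 2 + 1)) (cs.drop (cs.length / 2 + 1)) = true
      · by_cases hb2 : okB (cs.drop (cs.length / 2)) (cs.take (cs.length / 2)) = true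
        · simp [hb1, hb2, hr1, ht1, hm]
        · simp [hb1, hb2, hr1, ht1, hm]
      · by_cases hb2 : okB (cs.drop (cs.length / 2)) (cs.take (cs.length / 2)) = true
        · simp [hb1, hb2, hr1, ht1, hm]
        · simp [hb1, hb2, hr1, ht1, hm]

-- ===== VERDICT (by name: the statement is the Claim_ definition above) =====
theorem solve_spec : Claim_equal_solve := by
  intro U _
  unfold Spec_solve
  exact solve_eq_alt U
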